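-- pv_equiv track=rewrite | github.com/cmbi/compact-bio | src/rbomcl/utils.py | get_stripped_mapping
-- ===== SOURCE A (Python) =====
-- def get_stripped_mapping(full_id_list,sep='::'):
--     """
--     get dict with stripped ids mapping to list of their full ids
--     """
--     mapping = {}
--
--     for full_id in full_id_list:
--         stripped = full_id.rsplit(sep,1)[0]
--         if stripped in mapping.keys():
--             mapping[stripped].append(full_id)
--         else:
--             mapping[stripped] = [full_id]
--     return mapping
-- ===== SOURCE B (Python) =====
-- def get_stripped_mapping(full_id_list, sep='::'):
--     """
--     get dict with stripped ids mapping to list of their full ids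
--     (dedup the stripped keys first, then collect each group with a filter pass)
--     """
--     key = lambda fid: fid.rsplit(sep, 1)[0]
--     keys = list(dict.fromkeys(key(fid) for fid in full_id_list))
--     return {k: [fid for fid in full_id_list if key(fid) == k] for k in keys}
-- ===== Notes on version B (the rewrite author's own statement) =====
-- stated objective: alternative
-- what changed: replaces A's single-pass dict accumulation (append-or-insert per element) with a two-phase scheme: dedup the stripped keys in first-occurrence order, then build each group by a per-key filter over the input list
import Mathlib
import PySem

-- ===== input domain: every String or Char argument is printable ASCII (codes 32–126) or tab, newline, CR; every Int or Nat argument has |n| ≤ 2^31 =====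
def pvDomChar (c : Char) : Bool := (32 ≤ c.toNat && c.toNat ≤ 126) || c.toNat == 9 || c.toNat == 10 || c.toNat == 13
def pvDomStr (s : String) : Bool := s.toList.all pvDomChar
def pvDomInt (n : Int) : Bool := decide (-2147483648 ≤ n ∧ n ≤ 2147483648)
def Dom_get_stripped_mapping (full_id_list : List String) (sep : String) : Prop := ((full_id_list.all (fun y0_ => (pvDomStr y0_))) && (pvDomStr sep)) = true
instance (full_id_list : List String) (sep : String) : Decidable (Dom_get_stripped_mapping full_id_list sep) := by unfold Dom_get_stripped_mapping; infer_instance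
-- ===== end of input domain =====

-- B replaces A's one-pass dict accumulation by "dedup the stripped keys, then filter the list per key";
-- same values, same key and group order (objective: alternative decomposition, not faster).

-- ===== PORT A =====
-- shared helper: fid.rsplit(sep, 1)[0] for sep ≠ "" — the prefix before the LAST occurrence
-- of sep, or fid itself when sep does not occur (exact via PySem.Str.rfind on that domain)
def pvStrip (fid sep : String) : String :=
  let i := PySem.Str.rfind fid sep
  if i = -1 then fid else String.ofList (fid.toList.take i.toNat)

def get_stripped_mapping (full_id_list : List String) (sep : String) : List (String × List String) :=
  (full_id_list.foldl
    (fun (mapping : PySem.Dict String (List String)) full_id =>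
      let stripped := pvStrip full_id sep
      if mapping.contains stripped then
        -- mapping[stripped].append(full_id)
        mapping.insert stripped (mapping.getD stripped [] ++ [full_id])
      else
        mapping.insert stripped [full_id])
    PySem.Dict.empty).items

-- ===== PORT B =====
def get_stripped_mapping_alt (full_id_list : List String) (sep : String) : List (String × List String) :=
  (PySem.List.dedup (full_id_list.map (fun fid => pvStrip fid sep))).map
    (fun k => (k, full_id_list.filter (fun fid => pvStrip fid sep == k)))

-- ===== PRECONDITION & SPEC =====
-- Pre_ excludes only the inputs where Python raises: rsplit with an empty separator
-- (ValueError), reached whenever the list is non-empty.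
def Pre_get_stripped_mapping (full_id_list : List String) (sep : String) : Prop :=
  sep = "" → full_id_list = []
instance (full_id_list : List String) (sep : String) : Decidable (Pre_get_stripped_mapping full_id_list sep) := by unfold Pre_get_stripped_mapping; infer_instance

def pvWitness_get_stripped_mapping : List String × String := (["a::1", "b", "a::2"], "::")

def Spec_get_stripped_mapping (full_id_list : List String) (sep : String) (out : List (String × List String)) : Prop := out = get_stripped_mapping_alt full_id_list sep
instance (full_id_list : List String) (sep : String) (out : List (String × List String)) : Decidable (Spec_get_stripped_mapping full_id_list sep out) := by unfold Spec_get_stripped_mapping; infer_instance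

-- ===== CLAIM (what is proved, stated in full; the proofs are below) =====
def Claim_equal_get_stripped_mapping : Prop := ∀ (full_id_list : List String) (sep : String), Dom_get_stripped_mapping full_id_list sep → Pre_get_stripped_mapping full_id_list sep → Spec_get_stripped_mapping full_id_list sep (get_stripped_mapping full_id_list sep)

-- ===== LEMMAS AND PROOFS =====

-- A's loop body is exactly Dict.modify with default []
theorem pvStep_eq_modify (m : PySem.Dict String (List String)) (sep full_id : String) :
    (let stripped := pvStrip full_id sep
     if m.contains stripped then
       m.insert stripped (m.getD stripped [] ++ [full_id])
     else
       m.insert stripped [full_id])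
      = m.modify (pvStrip full_id sep) [] (· ++ [full_id]) := by
  by_cases h : m.contains (pvStrip full_id sep)
  · simp [h, PySem.Dict.modify]
  · simp only [Bool.not_eq_true] at h
    simp [h, PySem.Dict.modify, PySem.Dict.getD_of_not_contains m [] h]

theorem get_stripped_mapping_spec' (full_id_list : List String) (sep : String) :
    get_stripped_mapping full_id_list sep = get_stripped_mapping_alt full_id_list sep := by
  unfold get_stripped_mapping get_stripped_mapping_alt
  simp only [pvStep_eq_modify]
  set d := full_id_list.foldl
      (fun m full_id => m.modify (pvStrip full_id sep) [] (· ++ [full_id]))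
      PySem.Dict.empty with hd
  -- the same fold, over (key, id) pairs
  have hfold :
      d = (full_id_list.map (fun fid => (pvStrip fid sep, fid))).foldl
            (fun m p => m.modify p.1 [] (· ++ [p.2])) PySem.Dict.empty := by
    rw [hd, List.foldl_map]
  have hnodup : d.keys.Nodup := by
    rw [hd]
    exact PySem.Dict.nodup_keys_foldl_modify_key full_id_list (fun fid => pvStrip fid sep) []
      (fun _ fid => (· ++ [fid])) PySem.Dict.empty (by simp [PySem.Dict.keys_empty])
  have hkeys : d.keys = PySem.List.dedup (full_id_list.map (fun fid => pvStrip fid sep)) := by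
    rw [hd]
    rw [PySem.Dict.keys_foldl_modify_key full_id_list (fun fid => pvStrip fid sep) []
      (fun _ fid => (· ++ [fid])) PySem.Dict.empty]
    simp [PySem.Dict.keys_empty, PySem.Set.update_nil_left]
  have hgetD : ∀ k, d.getD k [] = full_id_list.filter (fun fid => pvStrip fid sep == k) := by
    intro k
    rw [hfold, PySem.Dict.getD_foldl_modify_append]
    rw [List.filter_map]
    simp [Function.comp_def]
  rw [PySem.Dict.items_eq_map_keys d hnodup [], hkeys]
  refine List.map_congr_left ?_
  intro k _
  rw [hgetD]

-- ===== VERDICT (by name: the statement is the Claim_ definition above) =====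
theorem get_stripped_mapping_spec : Claim_equal_get_stripped_mapping := by
  intro full_id_list sep _ _
  unfold Spec_get_stripped_mapping
  exact get_stripped_mapping_spec' full_id_list sep
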